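-- pv_equiv track=rewrite | github.com/eigent-ai/toolathlon_gym | local_servers/arxiv-latex-mcp/server/pg_adapter.py | list_sections
-- ===== SOURCE A (Python) =====
-- from typing import Optional, List
--
-- def list_sections(text: str) -> List[str]:
--     """List section headings from the processed text.
--
--     This mimics arxiv_to_prompt.list_sections by parsing section headers
--     from the full_prompt text. We look for patterns like:
--     # Section Title
--     ## Subsection Title
--     """
--     sections = []
--     for line in text.split('\n'):
--         stripped = line.strip()
--         if stripped.startswith('#'):
--             # Count heading level
--             level = 0
--             for ch in stripped:
--                 if ch == '#':
--                     level += 1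
--                 else:
--                     break
--             title = stripped[level:].strip()
--             if title:
--                 # Generate section path based on numbering
--                 sections.append(title)
--     return sections
-- ===== SOURCE B (Python) =====
-- from typing import Optional, List
--
-- def list_sections(text: str) -> List[str]:
--     """Single character-level pass: no split('\n'), no per-line strip,
--     no '#'-counting loop; scan indentation, hashes and the title in place."""
--     sections = []
--     i, n = 0, len(text)
--     WS = ' \t\r'
--     while i < n:
--         while i < n and text[i] in WS:
--             i += 1
--         if i < n and text[i] == '#':
--             while i < n and text[i] == '#':
--                 i += 1
--             j = i
--             while j < n and text[j] != '\n':
--                 j += 1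
--             title = text[i:j].strip(WS)
--             if title:
--                 sections.append(title)
--             i = j + 1
--         else:
--             while i < n and text[i] != '\n':
--                 i += 1
--             i += 1
--     return sections
-- ===== Notes on version B (the rewrite author's own statement) =====
-- stated objective: alternative
-- what changed: replaces A's newline-split plus per-line strip, startswith and hash-counting loops with a single character-level scan that walks indentation, hash marks and the title in place
import Mathlib
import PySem

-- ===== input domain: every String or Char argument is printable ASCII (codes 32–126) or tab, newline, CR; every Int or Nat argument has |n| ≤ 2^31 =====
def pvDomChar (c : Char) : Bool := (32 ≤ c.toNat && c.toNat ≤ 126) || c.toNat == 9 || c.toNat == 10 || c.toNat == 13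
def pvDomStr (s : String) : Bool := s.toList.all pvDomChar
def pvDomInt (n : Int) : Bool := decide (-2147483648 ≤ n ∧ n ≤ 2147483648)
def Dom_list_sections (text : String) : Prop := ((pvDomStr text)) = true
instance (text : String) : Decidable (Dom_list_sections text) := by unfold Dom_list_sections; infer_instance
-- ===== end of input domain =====

-- B replaces A's split('\n')/strip/startswith/level-counting per line by one character-level
-- scan of the text (alternative decomposition; same results on the ASCII domain).

-- ===== PORT A =====
-- the 'for ch in stripped: if ch == '#': level += 1 else: break' loop
def pvLevelA : List Char → Int → Int
  | [], level => level
  | ch :: rest, level => if ch == '#' then pvLevelA rest (level + 1) else level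

-- one iteration of A's 'for line in text.split('\n')' loop body
def pvStepA (sections : List (List Char)) (line : List Char) : List (List Char) :=
  let stripped := PySem.Chars.strip line
  if PySem.Chars.startswith stripped ['#'] then
    let level := pvLevelA stripped 0
    let title := PySem.Chars.strip (PySem.List.slice stripped (some level) none)
    if title ≠ [] then sections ++ [title] else sections
  else sections

def list_sections (text : String) : List String :=
  ((PySem.Chars.splitOn text.toList ['\n']).foldl pvStepA []).map String.ofList

-- ===== PORT B =====
-- Source B's WS = ' \t\r'
def pvWS (c : Char) : Bool := c == ' ' || c == '\t' || c == '\r'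

-- the outer 'while i < n' loop; each inner 'while' advancing i/j is a dropWhile/takeWhile
def pvScanB (s : List Char) : List (List Char) :=
  if hs : s = [] then []
  else
    let t := s.dropWhile pvWS
    if t.head? = some '#' then
      let u := t.dropWhile (· == '#')
      let seg := u.takeWhile (fun c => !(c == '\n'))
      let rest := u.dropWhile (fun c => !(c == '\n'))
      let title := PySem.Chars.stripChars seg [' ', '\t', '\r']
      (if title ≠ [] then [title] else []) ++ pvScanB (rest.drop 1)
    else
      pvScanB ((t.dropWhile (fun c => !(c == '\n'))).drop 1)
termination_by s.length
decreasing_by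
  · have h1 := List.length_dropWhile_le (fun c => !(c == '\n')) (List.dropWhile (· == '#') (s.dropWhile pvWS))
    have h2 := List.length_dropWhile_le (· == '#') (s.dropWhile pvWS)
    have h3 := List.length_dropWhile_le pvWS s
    have h4 : 0 < s.length := List.length_pos_iff.mpr hs
    simp only [List.length_drop]
    omega
  · have h1 := List.length_dropWhile_le (fun c => !(c == '\n')) (s.dropWhile pvWS)
    have h3 := List.length_dropWhile_le pvWS s
    have h4 : 0 < s.length := List.length_pos_iff.mpr hs
    simp only [List.length_drop]
    omega

def list_sections_alt (text : String) : List String :=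
  (pvScanB text.toList).map String.ofList

-- ===== PRECONDITION & SPEC =====
def Spec_list_sections (text : String) (out : List String) : Prop := out = list_sections_alt text
instance (text : String) (out : List String) : Decidable (Spec_list_sections text out) := by unfold Spec_list_sections; infer_instance

-- ===== CLAIM (what is proved, stated in full; the proofs are below) =====
def Claim_equal_list_sections : Prop := ∀ (text : String), Dom_list_sections text → Spec_list_sections text (list_sections text)

-- ===== LEMMAS AND PROOFS =====

-- drop whitespace from the right end
def pvRdrop (p : Char → Bool) (l : List Char) : List Char := (l.reverse.dropWhile p).reverse

-- strip from both ends, parametrised by the whitespace predicate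
def pvStripBy (p : Char → Bool) (l : List Char) : List Char := pvRdrop p (l.dropWhile p)

theorem pvStrip_eq (l : List Char) : PySem.Chars.strip l = pvStripBy PySem.Chars.isspace l := rfl

theorem pvStripChars_eq (l chars : List Char) :
    PySem.Chars.stripChars l chars = pvStripBy (fun c => chars.contains c) l := rfl

theorem pvRdrop_cons (p : Char → Bool) (a : Char) (l : List Char) :
    pvRdrop p (a :: l) =
      if pvRdrop p l = [] then (if p a then [] else [a]) else a :: pvRdrop p l := by
  unfold pvRdrop
  rw [List.reverse_cons, List.dropWhile_append]
  rcases h : List.dropWhile p l.reverse with _ | ⟨x, xs⟩ <;> simp [List.dropWhile] <;> split <;> simp_all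

theorem pvRdrop_cons_of_neg (p : Char → Bool) (a : Char) (l : List Char) (h : p a = false) :
    pvRdrop p (a :: l) = a :: pvRdrop p l := by
  rw [pvRdrop_cons]
  split <;> simp_all

theorem pvRdrop_eq_nil_iff (p : Char → Bool) (l : List Char) :
    pvRdrop p l = [] ↔ ∀ x ∈ l, p x = true := by
  unfold pvRdrop
  simp [List.dropWhile_eq_nil_iff]

theorem pvDropWhile_idem (p : Char → Bool) (l : List Char) :
    List.dropWhile p (List.dropWhile p l) = List.dropWhile p l := by
  induction l with
  | nil => rfl
  | cons a r ih =>
    by_cases h : p a = true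
    · simp [List.dropWhile_cons, h, ih]
    · simp [List.dropWhile_cons, h]

theorem pvRdrop_idem (p : Char → Bool) (l : List Char) :
    pvRdrop p (pvRdrop p l) = pvRdrop p l := by
  unfold pvRdrop
  simp [pvDropWhile_idem]

-- dropWhile q commutes with right-stripping by p when q-chars are never p-whitespace
theorem pvDropWhile_rdrop_comm (p q : Char → Bool) (hpq : ∀ c, q c = true → p c = false) :
    ∀ l : List Char, List.dropWhile q (pvRdrop p l) = pvRdrop p (List.dropWhile q l) := by
  intro l
  induction l with
  | nil => rfl
  | cons a r ih =>
    by_cases hq : q a = true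
    · have hp : p a = false := hpq a hq
      rw [pvRdrop_cons_of_neg p a r hp, List.dropWhile_cons_of_pos hq, List.dropWhile_cons_of_pos hq, ih]
    · have hq' : ¬ q a = true := hq
      rw [List.dropWhile_cons_of_neg hq', pvRdrop_cons]
      split
      · by_cases hp : p a = true
        · simp [hp]
        · rw [if_neg hp]
          simp [List.dropWhile_cons_of_neg hq']
      · rw [List.dropWhile_cons_of_neg hq']

-- stripping both ends after right-stripping is the same as stripping both ends
theorem pvStripBy_rdrop (p : Char → Bool) : ∀ l : List Char, pvStripBy p (pvRdrop p l) = pvStripBy p l := by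
  intro l
  induction l with
  | nil => rfl
  | cons a r ih =>
    by_cases hp : p a = true
    · rw [pvRdrop_cons]
      simp only [hp, if_true]
      by_cases hz : pvRdrop p r = []
      · simp only [hz, if_true]
        have : List.dropWhile p r = [] := by
          rw [List.dropWhile_eq_nil_iff]
          exact (pvRdrop_eq_nil_iff p r).mp hz
        unfold pvStripBy
        rw [List.dropWhile_cons_of_pos hp, this]
        rfl
      · simp only [hz, if_false]
        unfold pvStripBy
        rw [List.dropWhile_cons_of_pos hp, List.dropWhile_cons_of_pos hp]
        unfold pvStripBy at ih
        exact ih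
    · have hp' : p a = false := by simp_all
      rw [pvRdrop_cons_of_neg p a r hp']
      unfold pvStripBy
      rw [List.dropWhile_cons_of_neg (by simp [hp']), List.dropWhile_cons_of_neg (by simp [hp']),
        pvRdrop_cons_of_neg p a _ hp', pvRdrop_cons_of_neg p a _ hp', pvRdrop_idem]

theorem pvDropWhile_congr (p q : Char → Bool) :
    ∀ l : List Char, (∀ c ∈ l, p c = q c) → List.dropWhile p l = List.dropWhile q l := by
  intro l
  induction l with
  | nil => intro _; rfl
  | cons a r ih =>
    intro h
    have ha := h a (by simp)
    by_cases hp : p a = true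
    · rw [List.dropWhile_cons_of_pos hp, List.dropWhile_cons_of_pos (ha ▸ hp),
        ih (fun c hc => h c (by simp [hc]))]
    · have hp' : p a = false := by simp_all
      rw [List.dropWhile_cons_of_neg (by simp [hp']), List.dropWhile_cons_of_neg (by simp [ha ▸ hp'])]

theorem pvStripBy_congr (p q : Char → Bool) (l : List Char) (h : ∀ c ∈ l, p c = q c) :
    pvStripBy p l = pvStripBy q l := by
  unfold pvStripBy pvRdrop
  have h1 : ∀ c ∈ (List.dropWhile q l).reverse, p c = q c := by
    intro c hc
    exact h c ((List.dropWhile_sublist (p := q) (l := l)).subset (List.mem_reverse.mp hc))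
  rw [pvDropWhile_congr p q l h, pvDropWhile_congr p q _ h1]

-- the line structure of a character list (text.split('\n') at List Char level)
def pvLines : List Char → List (List Char)
  | [] => [[]]
  | c :: r => if c = '\n' then [] :: pvLines r else (c :: (pvLines r).headI) :: (pvLines r).tail

theorem pvLines_ne_nil (cs : List Char) : pvLines cs ≠ [] := by
  cases cs with
  | nil => simp [pvLines]
  | cons c r => unfold pvLines; split <;> simp

theorem pvLines_no_nl (a : List Char) (h : '\n' ∉ a) : pvLines a = [a] := by
  induction a with
  | nil => rfl
  | cons c r ih =>
    have hc : c ≠ '\n' := by intro hc; exact h (hc ▸ List.mem_cons_self)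
    unfold pvLines
    rw [if_neg hc, ih (fun hm => h (List.mem_cons_of_mem c hm))]
    rfl

theorem pvLines_append (a b : List Char) (h : '\n' ∉ a) :
    pvLines (a ++ '\n' :: b) = a :: pvLines b := by
  induction a with
  | nil => simp [pvLines]
  | cons c r ih =>
    have hc : c ≠ '\n' := by intro hc; exact h (hc ▸ List.mem_cons_self)
    have ih' := ih (fun hm => h (List.mem_cons_of_mem c hm))
    simp only [List.cons_append]
    unfold pvLines
    rw [if_neg hc, ih']
    cases b <;> simp [pvLines]

def pvConsHead (x : List Char) : List (List Char) → List (List Char)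
  | [] => [x]
  | y :: ys => (x ++ y) :: ys

theorem pvSplitOn_go_spec :
    ∀ (fuel : Nat) (l cur : List Char) (acc : List (List Char)), l.length < fuel →
      PySem.Chars.splitOn.go ['\n'] fuel l cur acc =
        acc.reverse ++ pvConsHead cur.reverse (pvLines l) := by
  intro fuel
  induction fuel with
  | zero => intro l cur acc h; omega
  | succ fuel ih =>
    intro l cur acc h
    cases l with
    | nil =>
      simp [PySem.Chars.splitOn.go, pvLines, pvConsHead]
    | cons c rest =>
      rw [PySem.Chars.splitOn.go]
      by_cases hc : c = '\n'
      · subst hc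
        have hpre : (['\n'] : List Char).isPrefixOf ('\n' :: rest) = true := by
          simp [List.isPrefixOf]
        rw [if_pos hpre]
        simp only [List.length_cons] at h
        rw [ih _ _ _ (by simpa using Nat.lt_of_succ_lt_succ h)]
        simp [pvLines, pvConsHead]
        cases hl : pvLines rest with
        | nil => exact absurd hl (pvLines_ne_nil rest)
        | cons y ys => simp [pvConsHead]
      · have hpre : (['\n'] : List Char).isPrefixOf (c :: rest) = false := by
          simp [List.isPrefixOf]
          exact fun hh => absurd hh.symm hc
        rw [if_neg (by simp [hpre])]
        simp only [List.length_cons] at h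
        rw [ih _ _ _ (Nat.lt_of_succ_lt_succ h)]
        have hstep : pvLines (c :: rest) = (c :: (pvLines rest).headI) :: (pvLines rest).tail := by
          conv_lhs => rw [pvLines]
          rw [if_neg hc]
        rw [hstep]
        cases hl : pvLines rest with
        | nil => exact absurd hl (pvLines_ne_nil rest)
        | cons y ys => simp [pvConsHead]

theorem pvSplitOn_eq_lines (cs : List Char) :
    PySem.Chars.splitOn cs ['\n'] = pvLines cs := by
  unfold PySem.Chars.splitOn
  rw [pvSplitOn_go_spec (cs.length + 1) cs [] [] (by omega)]
  cases hl : pvLines cs with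
  | nil => exact absurd hl (pvLines_ne_nil cs)
  | cons y ys => simp [pvConsHead]

-- characters: toNat injectivity and the whitespace predicates on the ASCII domain
theorem pvToNat_inj (c d : Char) (h : c.toNat = d.toNat) : c = d := by
  apply Char.ext
  apply UInt32.ext
  exact h

theorem pvBeq_toNat (c d : Char) : (c == d) = (c.toNat == d.toNat) := by
  by_cases h : c.toNat = d.toNat
  · obtain rfl := pvToNat_inj c d h
    simp
  · have h2 : c ≠ d := fun hh => h (congrArg Char.toNat hh)
    simp [h, h2]

theorem pvIsspace_eq (c : Char) (h1 : pvDomChar c = true) (h2 : c ≠ '\n') :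
    PySem.Chars.isspace c = pvWS c := by
  have h10 : c.toNat ≠ 10 := by
    intro hh
    exact h2 (pvToNat_inj c '\n' (by rw [hh]; decide))
  have hdom : (32 ≤ c.toNat ∧ c.toNat ≤ 126) ∨ c.toNat = 9 ∨ c.toNat = 10 ∨ c.toNat = 13 := by
    simpa [pvDomChar, or_assoc] using h1
  rw [Bool.eq_iff_iff]
  have hr : pvWS c = true ↔ (c.toNat = 32 ∨ c.toNat = 9 ∨ c.toNat = 13) := by
    unfold pvWS
    rw [pvBeq_toNat, pvBeq_toNat, pvBeq_toNat]
    rw [show (' ').toNat = 32 from rfl, show ('\t').toNat = 9 from rfl,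
      show ('\r').toNat = 13 from rfl]
    simp [or_assoc]
  have hl : PySem.Chars.isspace c = true ↔
      (c.toNat = 32 ∨ (9 ≤ c.toNat ∧ c.toNat ≤ 13) ∨ (28 ≤ c.toNat ∧ c.toNat ≤ 31) ∨
        c.toNat = 133 ∨ c.toNat = 160 ∨ c.toNat = 5760 ∨ (8192 ≤ c.toNat ∧ c.toNat ≤ 8202) ∨
        c.toNat = 8232 ∨ c.toNat = 8233 ∨ c.toNat = 8239 ∨ c.toNat = 8287 ∨ c.toNat = 12288) := by
    unfold PySem.Chars.isspace
    simp [or_assoc]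
  rw [hr, hl]
  omega

theorem pvContains_eq (c : Char) :
    (([' ', '\t', '\r'] : List Char).contains c) = pvWS c := by
  unfold pvWS
  simp only [List.contains_cons, List.contains_nil, Bool.or_false]
  rw [Bool.or_assoc]

-- A's foldl with an accumulator is the flatMap of its one-line result
theorem pvStepA_acc (acc : List (List Char)) (l : List Char) :
    pvStepA acc l = acc ++ pvStepA [] l := by
  simp only [pvStepA]
  split_ifs <;> simp

theorem pvFoldA : ∀ (ls : List (List Char)) (acc : List (List Char)),
    ls.foldl pvStepA acc = acc ++ ls.flatMap (fun l => pvStepA [] l) := by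
  intro ls
  induction ls with
  | nil => simp
  | cons l rest ih =>
    intro acc
    rw [List.foldl_cons, pvStepA_acc, ih, List.flatMap_cons, List.append_assoc]

-- what both programs compute for one newline-free line
def pvLineSpec (a : List Char) : List (List Char) :=
  let d := a.dropWhile pvWS
  if d.head? = some '#' then
    let ttl := pvStripBy pvWS (d.dropWhile (· == '#'))
    if ttl ≠ [] then [ttl] else []
  else []

theorem pvLevelA_eq : ∀ (s : List Char) (n : Int),
    pvLevelA s n = n + (s.takeWhile (· == '#')).length := by
  intro s
  induction s with
  | nil => intro n; simp [pvLevelA]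
  | cons c rest ih =>
    intro n
    unfold pvLevelA
    by_cases hc : (c == '#') = true
    · rw [if_pos hc, ih, List.takeWhile_cons_of_pos (p := (· == '#')) (l := rest) hc]
      simp
      omega
    · rw [if_neg (by simp_all),
        List.takeWhile_cons_of_neg (p := (· == '#')) (l := rest) (by simp_all)]
      simp

theorem pvDrop_takeWhile_len (p : Char → Bool) : ∀ s : List Char,
    List.drop (s.takeWhile p).length s = s.dropWhile p := by
  intro s
  induction s with
  | nil => rfl
  | cons a r ih =>
    by_cases h : p a = true
    · rw [List.takeWhile_cons_of_pos h, List.dropWhile_cons_of_pos h, List.length_cons,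
        List.drop_succ_cons, ih]
    · rw [List.takeWhile_cons_of_neg (by simp_all), List.dropWhile_cons_of_neg (by simp_all)]
      rfl

theorem pvDrop_level (s : List Char) :
    PySem.List.slice s (some (pvLevelA s 0)) none = s.dropWhile (· == '#') := by
  rw [pvLevelA_eq]
  simp only [zero_add]
  rw [PySem.List.slice_from s (by positivity)]
  rw [Int.toNat_natCast]
  exact pvDrop_takeWhile_len _ s

-- A's body on one Dom line, characterised with B's predicates
theorem pvStepA_spec (a : List Char) (ha : ∀ c ∈ a, pvDomChar c = true) (hn : '\n' ∉ a) :
    pvStepA [] a = pvLineSpec a := by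
  have hmemWS : ∀ c ∈ a, PySem.Chars.isspace c = pvWS c := by
    intro c hc
    exact pvIsspace_eq c (ha c hc) (fun hh => hn (hh ▸ hc))
  have hd : a.dropWhile PySem.Chars.isspace = a.dropWhile pvWS :=
    pvDropWhile_congr _ _ a hmemWS
  have hsub : ∀ c ∈ a.dropWhile pvWS, c ∈ a := fun c hc =>
    (List.dropWhile_sublist (p := pvWS) (l := a)).subset hc
  have hstrip : PySem.Chars.strip a = pvRdrop PySem.Chars.isspace (a.dropWhile pvWS) := by
    rw [pvStrip_eq]
    unfold pvStripBy
    rw [hd]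
  unfold pvStepA pvLineSpec
  cases hdd : a.dropWhile pvWS with
  | nil =>
    rw [hdd] at hstrip
    simp [hstrip, PySem.Chars.startswith, List.isPrefixOf, pvRdrop]
  | cons c d' =>
    have hc_ws : pvWS c = false := by
      have := List.head_dropWhile_not pvWS (l := a) (by simp [hdd])
      simpa [hdd] using this
    have hc_mem : c ∈ a := hsub c (by simp [hdd])
    have hc_sp : PySem.Chars.isspace c = false := (hmemWS c hc_mem) ▸ hc_ws
    rw [hdd] at hstrip
    rw [pvRdrop_cons_of_neg _ _ _ hc_sp] at hstrip
    by_cases hch : c = '#'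
    · subst hch
      have hsw : PySem.Chars.startswith (PySem.Chars.strip a) ['#'] = true := by
        rw [hstrip]
        simp [PySem.Chars.startswith, List.isPrefixOf]
      have hstrip' : PySem.Chars.strip a = pvRdrop PySem.Chars.isspace ('#' :: d') :=
        hstrip.trans (pvRdrop_cons_of_neg _ '#' d' hc_sp).symm
      have htitle :
          PySem.Chars.strip (PySem.List.slice (PySem.Chars.strip a) (some (pvLevelA (PySem.Chars.strip a) 0)) none) =
            pvStripBy pvWS (('#' :: d').dropWhile (· == '#')) := by
        rw [pvDrop_level, hstrip', pvStrip_eq]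
        have hcomm := pvDropWhile_rdrop_comm PySem.Chars.isspace (· == '#')
          (fun c hc => by
            have : c = '#' := by simpa using hc
            subst this
            decide) ('#' :: d')
        unfold pvStripBy
        rw [show ((pvRdrop PySem.Chars.isspace ('#' :: d')).dropWhile (· == '#')) =
              pvRdrop PySem.Chars.isspace (('#' :: d').dropWhile (· == '#')) from hcomm]
        have hK := pvStripBy_rdrop PySem.Chars.isspace (('#' :: d').dropWhile (· == '#'))
        unfold pvStripBy at hK
        rw [hK]
        have hmm : ∀ x ∈ ('#' :: d').dropWhile (· == '#'), PySem.Chars.isspace x = pvWS x := by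
          intro x hx
          exact hmemWS x (hsub x (hdd ▸ (List.dropWhile_sublist (p := (· == '#')) (l := '#' :: d')).subset hx))
        have := pvStripBy_congr _ _ _ hmm
        unfold pvStripBy at this
        exact this
      simp only [hdd]
      rw [if_pos hsw, htitle,
        if_pos (show (('#' :: d' : List Char)).head? = some '#' from rfl)]
      split_ifs <;> simp
    · have hsw : PySem.Chars.startswith (PySem.Chars.strip a) ['#'] = false := by
        rw [hstrip]
        simp [PySem.Chars.startswith, List.isPrefixOf]
        exact fun hh => absurd hh.symm hch
      simp only [hdd]
      rw [if_neg (by simp [hsw]), if_neg (by simp [hch])]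

-- dropWhile/takeWhile across the first newline
theorem pvDropWhile_append_nl (p : Char → Bool) (hp : p '\n' = false) (a b : List Char) :
    List.dropWhile p (a ++ '\n' :: b) = List.dropWhile p a ++ '\n' :: b := by
  rw [List.dropWhile_append]
  split
  · rename_i h
    rw [List.dropWhile_cons_of_neg (by simp [hp])]
    simp_all [List.isEmpty_iff]
  · rfl

theorem pvDropWhile_nl_all (x : List Char) (h : '\n' ∉ x) :
    List.dropWhile (fun c => !(c == '\n')) x = [] := by
  rw [List.dropWhile_eq_nil_iff]
  intro c hc
  simp
  exact fun hh => h (hh ▸ hc)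

theorem pvTakeWhile_nl (x b : List Char) (h : '\n' ∉ x) :
    List.takeWhile (fun c => !(c == '\n')) (x ++ '\n' :: b) = x := by
  have hx : List.takeWhile (fun c => !(c == '\n')) x = x := by
    rw [List.takeWhile_eq_self_iff]
    intro c hc
    simp
    exact fun hh => h (hh ▸ hc)
  rw [List.takeWhile_append]
  rw [if_pos (by rw [hx])]
  rw [List.takeWhile_cons_of_neg (by simp)]
  simp

-- B's scanner consumes exactly one line per step
theorem pvScanB_append (a b : List Char) (hn : '\n' ∉ a) :
    pvScanB (a ++ '\n' :: b) = pvLineSpec a ++ pvScanB b := by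
  rw [pvScanB]
  rw [dif_neg (by simp)]
  have ht : (a ++ '\n' :: b).dropWhile pvWS = a.dropWhile pvWS ++ '\n' :: b :=
    pvDropWhile_append_nl pvWS (by decide) a b
  have hsub : ∀ c ∈ a.dropWhile pvWS, c ∈ a := fun c hc =>
    (List.dropWhile_sublist (p := pvWS) (l := a)).subset hc
  have hnd : '\n' ∉ a.dropWhile pvWS := fun hc => hn (hsub _ hc)
  unfold pvLineSpec
  simp only [ht]
  cases hdd : a.dropWhile pvWS with
  | nil =>
    simp only [List.nil_append]
    rw [if_neg (by simp), if_neg (by simp)]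
    rw [List.dropWhile_cons_of_neg (by decide), List.drop_succ_cons, List.drop_zero,
      List.nil_append]
  | cons c d' =>
    rw [hdd] at hnd
    by_cases hch : c = '#'
    · subst hch
      rw [if_pos (show (('#' :: d' ++ '\n' :: b : List Char)).head? = some '#' from by simp),
        if_pos (show (('#' :: d' : List Char)).head? = some '#' from rfl)]
      have hu : ('#' :: d' ++ '\n' :: b).dropWhile (· == '#') =
          ('#' :: d').dropWhile (· == '#') ++ '\n' :: b := by
        have := pvDropWhile_append_nl (· == '#') (by decide) ('#' :: d') b
        simpa using this
      have hnu : '\n' ∉ ('#' :: d').dropWhile (· == '#') := fun hc =>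
        hnd ((List.dropWhile_sublist (p := (· == '#')) (l := '#' :: d')).subset hc)
      simp only [hu]
      rw [pvTakeWhile_nl _ _ hnu]
      rw [pvDropWhile_append_nl _ (by decide) _ b, pvDropWhile_nl_all _ hnu]
      simp only [List.nil_append, List.drop_succ_cons, List.drop_zero]
      have : PySem.Chars.stripChars (('#' :: d').dropWhile (· == '#')) [' ', '\t', '\r'] =
          pvStripBy pvWS (('#' :: d').dropWhile (· == '#')) := by
        rw [pvStripChars_eq]
        exact pvStripBy_congr _ _ _ (fun c _ => pvContains_eq c)
      rw [this]
    · rw [if_neg (show ¬ ((c :: d' ++ '\n' :: b : List Char).head? = some '#') from by simp [hch]),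
        if_neg (show ¬ ((c :: d' : List Char).head? = some '#') from by simp [hch])]
      rw [pvDropWhile_append_nl _ (by decide) _ b, pvDropWhile_nl_all _ hnd]
      simp

theorem pvScanB_last (a : List Char) (hn : '\n' ∉ a) :
    pvScanB a = pvLineSpec a := by
  by_cases hae : a = []
  · subst hae
    rw [pvScanB]
    simp [pvLineSpec]
  rw [pvScanB, dif_neg hae]
  have hsub : ∀ c ∈ a.dropWhile pvWS, c ∈ a := fun c hc =>
    (List.dropWhile_sublist (p := pvWS) (l := a)).subset hc
  have hnd : '\n' ∉ a.dropWhile pvWS := fun hc => hn (hsub _ hc)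
  unfold pvLineSpec
  cases hdd : a.dropWhile pvWS with
  | nil =>
    simp only [hdd]
    rw [if_neg (by simp), if_neg (by simp)]
    simp [pvScanB]
  | cons c d' =>
    rw [hdd] at hnd
    by_cases hch : c = '#'
    · subst hch
      rw [if_pos (show (('#' :: d' : List Char)).head? = some '#' from rfl),
        if_pos (show (('#' :: d' : List Char)).head? = some '#' from rfl)]
      have hnu : '\n' ∉ ('#' :: d').dropWhile (· == '#') := fun hc =>
        hnd ((List.dropWhile_sublist (p := (· == '#')) (l := '#' :: d')).subset hc)
      have hseg : (('#' :: d').dropWhile (· == '#')).takeWhile (fun c => !(c == '\n')) =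
          ('#' :: d').dropWhile (· == '#') := by
        rw [List.takeWhile_eq_self_iff]
        intro c hc
        simp
        exact fun hh => hnu (hh ▸ hc)
      have hstc : PySem.Chars.stripChars (('#' :: d').dropWhile (· == '#')) [' ', '\t', '\r'] =
          pvStripBy pvWS (('#' :: d').dropWhile (· == '#')) := by
        rw [pvStripChars_eq]
        exact pvStripBy_congr _ _ _ (fun c _ => pvContains_eq c)
      simp only [hseg, pvDropWhile_nl_all _ hnu, List.drop_nil, hstc]
      rw [show pvScanB [] = [] from by rw [pvScanB]; simp]
      simp
    · rw [if_neg (by simp [hch]), if_neg (by simp [hch])]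
      simp only [pvDropWhile_nl_all _ hnd, List.drop_nil]
      rw [pvScanB]
      simp

-- the main induction: line structure on the left, the scanner on the right
theorem pvMain : ∀ (n : Nat) (cs : List Char), cs.length ≤ n → (∀ c ∈ cs, pvDomChar c = true) →
    (pvLines cs).flatMap (fun l => pvStepA [] l) = pvScanB cs := by
  intro n
  induction n with
  | zero =>
    intro cs hlen _
    have : cs = [] := List.length_eq_zero_iff.mp (Nat.le_zero.mp hlen)
    subst this
    rw [show pvScanB [] = [] from by rw [pvScanB]; simp]
    rw [pvLines]
    rw [List.flatMap_cons]
    rw [pvStepA_spec [] (by simp) (by simp)]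
    simp [pvLineSpec]
  | succ n ih =>
    intro cs hlen hdom
    by_cases hmem : '\n' ∈ cs
    · cases hdc : cs.dropWhile (fun c => !(c == '\n')) with
      | nil =>
        exfalso
        have := List.dropWhile_eq_nil_iff.mp hdc '\n' hmem
        simp at this
      | cons h0 b =>
        have hh0 : h0 = '\n' := by
          have := List.head_dropWhile_not (fun c => !(c == '\n')) (l := cs) (by simp [hdc])
          simp [hdc] at this
          exact this
        subst hh0
        set a := cs.takeWhile (fun c => !(c == '\n')) with hadef
        have hcs : a ++ '\n' :: b = cs := by
          rw [hadef, ← hdc, List.takeWhile_append_dropWhile]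
        have hna : '\n' ∉ a := by
          intro hc
          have := List.mem_takeWhile_imp hc
          simp at this
        have hlena : a.length + 1 + b.length = cs.length := by
          rw [← hcs]
          simp
          omega
        have hdoma : ∀ c ∈ a, pvDomChar c = true := fun c hc =>
          hdom c (by rw [← hcs]; exact List.mem_append_left _ hc)
        have hdomb : ∀ c ∈ b, pvDomChar c = true := fun c hc =>
          hdom c (by rw [← hcs]; exact List.mem_append_right _ (List.mem_cons_of_mem _ hc))
        rw [← hcs, pvLines_append a b hna, List.flatMap_cons,
          pvStepA_spec a hdoma hna, pvScanB_append a b hna,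
          ih b (by omega) hdomb]
    · rw [pvLines_no_nl cs hmem, List.flatMap_cons, List.flatMap_nil,
        pvStepA_spec cs hdom hmem, pvScanB_last cs hmem]
      simp

-- ===== VERDICT (by name: the statement is the Claim_ definition above) =====
theorem list_sections_spec : Claim_equal_list_sections := by
  intro text hdom
  have ha : ∀ c ∈ text.toList, pvDomChar c = true := by
    have := hdom
    unfold Dom_list_sections pvDomStr at this
    simpa [List.all_eq_true] using this
  unfold Spec_list_sections list_sections list_sections_alt
  rw [pvSplitOn_eq_lines, pvFoldA, pvMain text.toList.length text.toList le_rfl ha]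
  simp
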